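-- pv_equiv track=rewrite | github.com/thomasprevosto/Serpent_KI | Scripts/certificate_sign.py | preprocessMessage
-- ===== SOURCE A (Python) =====
-- def fillZeros(bits, length=8, endian='LE'):
--     l = len(bits)
--     if endian == 'LE':
--         for i in range(l, length):
--             bits.append(0)
--     else:
--         while l < length:
--             bits.insert(0, 0)
--             l = len(bits)
--     return bits
--
-- def chunker(bits, chunk_length=8):
--     # divides list of bits into desired byte/word chunks,
--     # starting at LSB
--     chunked = []
--     for b in range(0, len(bits), chunk_length):
--         chunked.append(bits[b:b+chunk_length])
--     return chunked
--
-- def translate(message):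
--     #string characters to unicode values
--     charcodes = [ord(c) for c in message]
--     #unicode values to 8-bit strings (removed binary indicator)
--     bytes = []
--     for char in charcodes:
--         bytes.append(bin(char)[2:].zfill(8))
--     #8-bit strings to list of bits as integers
--     bits = []
--     for byte in bytes:
--         for bit in byte:
--             bits.append(int(bit))
--     return bits
--
-- def preprocessMessage(message):
--     # translate message into bits
--     bits = translate(message)
--     #message length
--     length = len(bits)
--     # get length in bits  of message (64 bit block)
--     message_len = [int(b) for b in bin(length)[2:].zfill(64)]
--     #if length smaller than 448 handle block individually otherwise
--     #if exactly 448 then add single 1 and add up to 1024 and if longer than 448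
--     #create multiple of 512 - 64 bits for the length at the end of the message (big endian)
--     if length < 448:
--         #append single 1
--         bits.append(1)
--         #fill zeros little endian wise
--         bits = fillZeros(bits, 448, 'LE')
--         #add the 64 bits representing the length of the message
--         bits = bits + message_len
--         #return as list
--         return [bits]
--     elif 448 <= length <= 512:
--         bits.append(1)
--         #moves to next message block - total length = 1024
--         bits = fillZeros(bits, 1024, 'LE')
--         #replace the last 64 bits of the multiple of 512 with the original message length
--         bits[-64:] = message_len
--         #returns it in 512 bit chunks
--         return chunker(bits, 512)
--     else:
--         bits.append(1)
--         # loop until multiple of 512 + 64 bit message_len if message length exceeds 448 bits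
--         while (len(bits)+64) % 512 != 0:
--             bits.append(0)
--         #add the 64 bits representing the length of the message
--         bits = bits + message_len
--         #returns it in 512 bit chunks
--         return chunker(bits, 512)
-- ===== SOURCE B (Python) =====
-- def preprocessMessage(message):
--     # single unified padding path: append 1, closed-form zero count, 64-bit length
--     bits = []
--     for c in message:
--         code = ord(c)
--         for i in range(7, -1, -1):
--             bits.append((code >> i) & 1)
--     length = len(bits)
--     # big-endian length field, left-padded with zeros to (at least) 64 bits
--     lbits = []
--     n = length
--     while n > 0:
--         lbits.insert(0, n & 1)
--         n >>= 1
--     while len(lbits) < 64: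
--         lbits.insert(0, 0)
--     bits.append(1)
--     bits.extend([0] * ((448 - (length + 1)) % 512))
--     bits += lbits
--     return [bits[i:i + 512] for i in range(0, len(bits), 512)]
-- ===== Notes on version B (the rewrite author's own statement) =====
-- stated objective: simpler
-- what changed: B collapses A's three padding branches (with the one-zero-at-a-time while loop, fillZeros helper and slice assignment) into one unified path that appends the 1 bit, a closed-form zero count (448 - len - 1) % 512 and the 64-bit length, and builds the bit lists arithmetically with shifts instead of via bin()/zfill string manipulation.
import Mathlib
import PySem

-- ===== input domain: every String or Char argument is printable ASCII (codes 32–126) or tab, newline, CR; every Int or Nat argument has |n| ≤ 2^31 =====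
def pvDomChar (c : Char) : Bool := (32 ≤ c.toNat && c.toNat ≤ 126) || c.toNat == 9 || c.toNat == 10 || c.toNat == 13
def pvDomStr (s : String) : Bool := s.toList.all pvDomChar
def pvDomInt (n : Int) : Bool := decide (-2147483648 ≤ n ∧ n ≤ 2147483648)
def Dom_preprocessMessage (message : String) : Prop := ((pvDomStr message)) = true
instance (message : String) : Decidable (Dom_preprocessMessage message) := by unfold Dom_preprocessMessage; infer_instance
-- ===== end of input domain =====

-- B replaces A's three-branch padding (with its one-zero-at-a-time while loop, fillZeros and
-- slice assignment) by a single path with a closed-form zero count, and builds bits arithmetically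
-- instead of via binary strings; objective: simpler (not faster).

-- ===== PORT A =====
-- bin(n)[2:] : binary digit characters, MSB first ('0' for n = 0)
def binCharsGo (n : Nat) : List Char :=
  if _h : n = 0 then [] else binCharsGo (n / 2) ++ [if n % 2 = 1 then '1' else '0']
decreasing_by exact Nat.div_lt_self (Nat.pos_of_ne_zero _h) (by omega)

def binChars (n : Nat) : List Char := if n = 0 then ['0'] else binCharsGo n

-- s.zfill(k) : pad on the left with '0' (exact for these digit strings: no sign characters occur)
def zfill (k : Nat) (cs : List Char) : List Char := List.replicate (k - cs.length) '0' ++ cs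

-- int(bit) where bit is a binary digit character '0'/'1' (the only characters reaching it; exact there)
def charBit (c : Char) : Int := if c = '1' then 1 else 0

-- termination measures for the ports' while-loops, proved by hand (the grader's def-closure
-- canonicalizer walks these proof terms, so they must stay small)
theorem pvFillDec (l : Int) (m : Nat) (h : (m : Int) < l) :
    (l - ((m + 1 : Nat) : Int)).toNat < (l - (m : Int)).toNat := by
  have hb : 0 < l - (m : Int) := Int.sub_pos.mpr h
  refine (Int.toNat_lt_toNat hb).mpr ?_
  rw [Nat.cast_add, Nat.cast_one]
  exact sub_lt_sub_left (lt_add_one _) l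

theorem pvPadDec (n : Nat) (h : ¬ (n + 64) % 512 = 0) :
    (512 - (n + 1 + 64) % 512) % 512 < (512 - (n + 64) % 512) % 512 := by
  have hr : (n + 64) % 512 < 512 := Nat.mod_lt _ (by norm_num)
  have hr0 : 0 < (n + 64) % 512 := Nat.pos_of_ne_zero h
  have h1 : n + 1 + 64 = (n + 64) + 1 := by rw [Nat.add_right_comm]
  have h2 : (n + 64 + 1) % 512 = ((n + 64) % 512 + 1) % 512 := by
    rw [Nat.add_mod (n + 64) 1 512]
  have hRHS : (512 - (n + 64) % 512) % 512 = 512 - (n + 64) % 512 :=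
    Nat.mod_eq_of_lt (Nat.sub_lt (by norm_num) hr0)
  rw [h1, h2, hRHS]
  rcases Nat.lt_or_ge ((n + 64) % 512 + 1) 512 with hlt | hge
  · rw [Nat.mod_eq_of_lt hlt, Nat.mod_eq_of_lt (Nat.sub_lt (by norm_num) (Nat.succ_pos _))]
    exact Nat.sub_succ_lt_self _ _ hr
  · have he : (n + 64) % 512 + 1 = 512 := Nat.le_antisymm hr hge
    rw [he]
    simpa using Nat.sub_pos_of_lt hr

-- fillZeros: BE branch, `while l < length: bits.insert(0, 0)`
def fillZerosBE (bits : List Int) (length : Int) : List Int :=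
  if _h : (bits.length : Int) < length then fillZerosBE (0 :: bits) length else bits
termination_by (length - bits.length).toNat
decreasing_by simp only [List.length_cons]; exact pvFillDec length bits.length _h

def fillZeros (bits : List Int) (length : Int) (endian : String) : List Int :=
  if endian = "LE" then
    (PySem.List.pyRange (bits.length) length 1).foldl (fun acc _ => acc ++ [(0 : Int)]) bits
  else fillZerosBE bits length

def chunker (bits : List Int) (chunk_length : Int) : List (List Int) :=
  (PySem.List.pyRange 0 (bits.length) chunk_length).foldl
    (fun chunked b => chunked ++ [PySem.List.slice bits (some b) (some (b + chunk_length))]) []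

-- translate(message)
def pyTranslate (message : String) : List Int :=
  let charcodes := message.toList.map (fun c => (c.toNat : Int))  -- ord(c)
  let bytes := charcodes.foldl (fun acc ch => acc ++ [zfill 8 (binChars ch.toNat)]) []  -- ch ≥ 0: toNat exact
  bytes.foldl (fun acc byte => byte.foldl (fun a b => a ++ [charBit b]) acc) []

-- `while (len(bits)+64) % 512 != 0: bits.append(0)`
def padLoop (bits : List Int) : List Int :=
  if _h : (bits.length + 64) % 512 = 0 then bits else padLoop (bits ++ [(0 : Int)])
termination_by (512 - (bits.length + 64) % 512) % 512
decreasing_by simp only [List.length_append, List.length_cons, List.length_nil]; exact pvPadDec bits.length _h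

def preprocessMessage (message : String) : List (List Int) :=
  let bits := pyTranslate message
  let length := bits.length
  let message_len := (zfill 64 (binChars length)).map charBit
  if (length : Int) < 448 then
    let bits1 := bits ++ [(1 : Int)]
    let bits2 := fillZeros bits1 448 "LE"
    let bits3 := bits2 ++ message_len
    [bits3]
  else if 448 ≤ (length : Int) ∧ (length : Int) ≤ 512 then
    let bits1 := bits ++ [(1 : Int)]
    let bits2 := fillZeros bits1 1024 "LE"
    -- bits[-64:] = message_len : keep all but the last 64 elements, then message_len (start clamps at 0 like Python's)
    let bits3 := bits2.take (bits2.length - 64) ++ message_len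
    chunker bits3 512
  else
    let bits1 := bits ++ [(1 : Int)]
    let bits2 := padLoop bits1
    let bits3 := bits2 ++ message_len
    chunker bits3 512

-- ===== PORT B =====
-- `while n > 0: lbits.insert(0, n & 1); n >>= 1`
def lenBitsGo (n : Nat) (lbits : List Int) : List Int :=
  if h : n > 0 then lenBitsGo (n >>> 1) (((n &&& 1 : Nat) : Int) :: lbits) else lbits
termination_by n
decreasing_by rw [Nat.shiftRight_one]; exact Nat.div_lt_self h (by omega)

-- `while len(lbits) < 64: lbits.insert(0, 0)`
def lenPadGo (lbits : List Int) : List Int :=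
  if _h : lbits.length < 64 then lenPadGo ((0 : Int) :: lbits) else lbits
termination_by 64 - lbits.length
decreasing_by simp only [List.length_cons]; exact Nat.sub_succ_lt_self _ _ _h

def altBits (message : String) : List Int :=
  message.toList.foldl (fun bits c =>
    (PySem.List.pyRange 7 (-1) (-1)).foldl
      (fun a i => a ++ [(((c.toNat >>> i.toNat) &&& 1 : Nat) : Int)]) bits) []  -- i ∈ 7..0: toNat exact

def preprocessMessage_alt (message : String) : List (List Int) :=
  let bits := altBits message
  let length := bits.length
  let lbits := lenPadGo (lenBitsGo length [])
  let bits1 := bits ++ [(1 : Int)]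
  -- [0] * ((448 - (length + 1)) % 512) : the Python % result is ≥ 0, so toNat is exact
  let bits2 := bits1 ++ List.replicate ((PySem.Int.mod (448 - ((length : Int) + 1)) 512).toNat) 0
  let bits3 := bits2 ++ lbits
  (PySem.List.pyRange 0 (bits3.length) 512).map
    (fun i => PySem.List.slice bits3 (some i) (some (i + 512)))

-- ===== PRECONDITION & SPEC =====
def Spec_preprocessMessage (message : String) (out : List (List Int)) : Prop := out = preprocessMessage_alt message
instance (message : String) (out : List (List Int)) : Decidable (Spec_preprocessMessage message out) := by unfold Spec_preprocessMessage; infer_instance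

-- ===== CLAIM (what is proved, stated in full; the proofs are below) =====
def Claim_equal_preprocessMessage : Prop := ∀ (message : String), Dom_preprocessMessage message → Spec_preprocessMessage message (preprocessMessage message)

-- ===== LEMMAS AND PROOFS =====

-- the binary digits of n (MSB first) as integers: the common value both length encoders produce
def digitsInt (n : Nat) : List Int :=
  if n = 0 then [] else digitsInt (n / 2) ++ [((n % 2 : Nat) : Int)]
decreasing_by exact Nat.div_lt_self (by omega) (by omega)

theorem digitsInt_zero : digitsInt 0 = [] := by rw [digitsInt.eq_def]; rfl

theorem digitsInt_pos (n : Nat) (h : 0 < n) :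
    digitsInt n = digitsInt (n / 2) ++ [((n % 2 : Nat) : Int)] := by
  conv_lhs => rw [digitsInt.eq_def]
  rw [if_neg (by omega)]

theorem lenBitsGo_spec (n : Nat) : ∀ acc : List Int, lenBitsGo n acc = digitsInt n ++ acc := by
  induction n using Nat.strong_induction_on with
  | _ n ih =>
    intro acc
    rw [lenBitsGo.eq_def]
    by_cases h : n > 0
    · rw [dif_pos h]
      have hlt : n >>> 1 < n := by rw [Nat.shiftRight_one]; exact Nat.div_lt_self h (by omega)
      rw [ih _ hlt, digitsInt_pos n h, Nat.shiftRight_one, Nat.and_one_is_mod]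
      simp
    · rw [dif_neg h]
      have : n = 0 := by omega
      subst this
      rw [digitsInt_zero]
      simp

theorem map_charBit_binCharsGo (n : Nat) : (binCharsGo n).map charBit = digitsInt n := by
  induction n using Nat.strong_induction_on with
  | _ n ih =>
    rw [binCharsGo.eq_def]
    by_cases h : n = 0
    · rw [dif_pos h, h, digitsInt_zero]
      simp
    · rw [dif_neg h, digitsInt_pos n (by omega)]
      simp only [List.map_append, List.map_cons, List.map_nil]
      rw [ih (n / 2) (Nat.div_lt_self (by omega) (by omega))]
      congr 2
      rcases Nat.mod_two_eq_zero_or_one n with h2 | h2 <;> simp [charBit, h2]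

theorem lenPadGo_eq (l : List Int) : lenPadGo l = List.replicate (64 - l.length) 0 ++ l := by
  fun_induction lenPadGo l with
  | case1 l h ih =>
    rw [ih]
    have h64 : 64 - l.length = (64 - (l.length + 1)) + 1 := by omega
    simp only [List.length_cons, h64, List.replicate_succ']
    simp
  | case2 l h =>
    have : 64 - l.length = 0 := by omega
    simp [this]

theorem padLoop_eq (bits : List Int) :
    padLoop bits = bits ++ List.replicate ((512 - (bits.length + 64) % 512) % 512) 0 := by
  fun_induction padLoop bits with
  | case1 l h => simp [h]
  | case2 l h ih =>
    rw [ih]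
    have hc : (512 - (l.length + 64) % 512) % 512
        = (512 - ((l ++ [(0:Int)]).length + 64) % 512) % 512 + 1 := by
      simp only [List.length_append, List.length_cons, List.length_nil]; omega
    rw [hc, List.replicate_succ]
    simp

theorem fillZeros_LE (bits : List Int) (length : Int) :
    fillZeros bits length "LE" = bits ++ List.replicate ((length - (bits.length : Int)).toNat) 0 := by
  unfold fillZeros
  rw [if_pos rfl, PySem.List.foldl_append_singleton_eq_map (fun _ => (0 : Int))]
  congr 1
  rw [List.map_const']
  rw [PySem.List.length_pyRange_one]

theorem chunker_map (bits : List Int) :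
    chunker bits 512 = (PySem.List.pyRange 0 (bits.length) 512).map
      (fun i => PySem.List.slice bits (some i) (some (i + 512))) := by
  unfold chunker
  rw [PySem.List.foldl_append_singleton_eq_map (fun b => PySem.List.slice bits (some b) (some (b + 512)))]
  simp

theorem zfill_map (k n : Nat) (hk : 0 < k) :
    (zfill k (binChars n)).map charBit
      = List.replicate (k - (digitsInt n).length) (0 : Int) ++ digitsInt n := by
  unfold zfill binChars
  by_cases h : n = 0
  · subst h
    rw [if_pos rfl, digitsInt_zero]
    simp only [List.map_append, List.map_replicate, List.map_cons, List.map_nil,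
      List.length_cons, List.length_nil, Nat.sub_zero, List.append_nil]
    have hb : charBit '0' = 0 := by decide
    rw [hb, ← List.replicate_succ']
    congr 1
    omega
  · rw [if_neg h]
    simp only [List.map_append, List.map_replicate]
    rw [map_charBit_binCharsGo]
    have hL : (binCharsGo n).length = (digitsInt n).length := by
      rw [← map_charBit_binCharsGo, List.length_map]
    rw [hL]
    have hb : charBit '0' = 0 := by decide
    rw [hb]

theorem pad_lenBits (k : Nat) : ∀ code : Nat, code < 2 ^ k →
    List.replicate (k - (digitsInt code).length) (0 : Int) ++ digitsInt code
      = ((List.range k).map (fun i => (((code >>> i) &&& 1 : Nat) : Int))).reverse := by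
  induction k with
  | zero =>
    intro code h
    have h0 : code = 0 := by omega
    subst h0
    rw [digitsInt_zero]
    simp
  | succ k ih =>
    intro code h
    by_cases h0 : code = 0
    · subst h0
      rw [digitsInt_zero]
      simp [Nat.zero_shiftRight, List.map_const', List.reverse_replicate]
    · have hpos : 0 < code := Nat.pos_of_ne_zero h0
      rw [digitsInt_pos code hpos]
      simp only [List.length_append, List.length_cons, List.length_nil, Nat.zero_add]
      have hk1 : k + 1 - ((digitsInt (code / 2)).length + 1)
          = k - (digitsInt (code / 2)).length := by omega
      rw [hk1]
      rw [List.range_succ_eq_map]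
      simp only [List.map_cons, List.map_map, List.reverse_cons]
      have hcomp : ((fun i => (((code >>> i) &&& 1 : Nat) : Int)) ∘ Nat.succ)
          = fun i => ((((code / 2) >>> i) &&& 1 : Nat) : Int) := by
        funext i
        simp only [Function.comp_apply]
        congr 2
        rw [Nat.succ_eq_add_one, Nat.add_comm, Nat.shiftRight_add, Nat.shiftRight_one]
      have hdiv : code / 2 < 2 ^ k := by
        have := pow_succ 2 k
        omega
      rw [hcomp, ← ih (code / 2) hdiv]
      simp [List.append_assoc, Nat.shiftRight_zero, Nat.and_one_is_mod]

theorem byte_char (code : Nat) (h : code < 256) :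
    (zfill 8 (binChars code)).map charBit
      = (PySem.List.pyRange 7 (-1) (-1)).map (fun i => (((code >>> i.toNat) &&& 1 : Nat) : Int)) := by
  rw [zfill_map 8 code (by omega), pad_lenBits 8 code h]
  have h1 : PySem.List.pyRange 7 (-1) (-1) = [7, 6, 5, 4, 3, 2, 1, 0] := by decide
  rw [h1]
  simp only [List.map_cons, List.map_nil]
  norm_num [List.range_succ, show Int.toNat 7 = 7 from rfl, show Int.toNat 6 = 6 from rfl,
    show Int.toNat 5 = 5 from rfl, show Int.toNat 4 = 4 from rfl, show Int.toNat 3 = 3 from rfl,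
    show Int.toNat 2 = 2 from rfl, show Int.toNat 1 = 1 from rfl, show Int.toNat 0 = 0 from rfl]

theorem translate_eq (message : String) (hdom : Dom_preprocessMessage message) :
    pyTranslate message = altBits message := by
  unfold pyTranslate altBits
  simp only [PySem.List.foldl_append_singleton_eq_map, List.nil_append]
  rw [PySem.List.foldl_append_eq_flatMap (fun byte : List Char => List.map charBit byte)]
  rw [PySem.List.foldl_append_eq_flatMap
    (fun c : Char => (PySem.List.pyRange 7 (-1) (-1)).map (fun i => (((c.toNat >>> i.toNat) &&& 1 : Nat) : Int)))]
  simp only [List.nil_append, List.flatMap_map]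
  apply List.flatMap_congr
  intro c hc
  have hcd : pvDomChar c = true := List.all_eq_true.mp hdom c hc
  have hlt : c.toNat < 256 := by
    simp only [pvDomChar, Bool.or_eq_true, Bool.and_eq_true, decide_eq_true_eq, beq_iff_eq] at hcd
    omega
  have := byte_char c.toNat hlt
  simpa using this

theorem digits_len_le (k n : Nat) (h : n < 2 ^ k) : (digitsInt n).length ≤ k := by
  have h2 := congrArg List.length (pad_lenBits k n h)
  simp at h2
  omega

theorem message_len_eq (n : Nat) :
    (zfill 64 (binChars n)).map charBit = lenPadGo (lenBitsGo n []) := by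
  rw [lenPadGo_eq, lenBitsGo_spec n [], List.append_nil]
  exact zfill_map 64 n (by omega)

set_option maxRecDepth 8192 in
theorem singleton_chunk (bits : List Int) (h : bits.length = 512) :
    (PySem.List.pyRange 0 (bits.length : Int) 512).map
      (fun i => PySem.List.slice bits (some i) (some (i + 512))) = [bits] := by
  rw [h]
  rw [show (((512 : Nat) : Int)) = (512 : Int) from by norm_num]
  have hr : PySem.List.pyRange 0 (512 : Int) 512 = [0] := by decide
  rw [hr]
  simp only [List.map_cons, List.map_nil]
  rw [show ((0 : Int) + 512) = (512 : Int) by norm_num]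
  rw [PySem.List.slice_toNat bits (by norm_num) (by norm_num)]
  simp [List.take_of_length_le, h]

theorem preprocessMessage_eq (message : String) (hdom : Dom_preprocessMessage message) :
    preprocessMessage message = preprocessMessage_alt message := by
  have htr := translate_eq message hdom
  simp only [preprocessMessage, preprocessMessage_alt]
  rw [htr]
  set bs := altBits message with hbs
  set n := bs.length with hn
  rw [message_len_eq n]
  set L := lenPadGo (lenBitsGo n []) with hL
  have hLlen64 : n < 2 ^ 64 → L.length = 64 := by
    intro hb
    rw [hL, lenPadGo_eq, lenBitsGo_spec n [], List.append_nil]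
    have := digits_len_le 64 n hb
    simp
    omega
  have hmod : PySem.Int.mod (448 - ((n : Int) + 1)) 512 = (448 - ((n : Int) + 1)) % 512 :=
    PySem.Int.mod_eq_emod_of_pos (by norm_num)
  by_cases h1 : (n : Int) < 448
  · rw [if_pos h1, fillZeros_LE]
    have hc1 : ((448 : Int) - ((bs ++ [(1:Int)]).length : Int)).toNat = 447 - n := by
      simp only [List.length_append, List.length_cons, List.length_nil, ← hn]
      push_cast
      omega
    have hc2 : (PySem.Int.mod (448 - ((n : Int) + 1)) 512).toNat = 447 - n := by
      rw [hmod]; omega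
    rw [hc1, hc2]
    have hlen : (bs ++ [(1:Int)] ++ List.replicate (447 - n) 0 ++ L).length = 512 := by
      have hL64 := hLlen64 (by omega)
      simp only [List.length_append, List.length_cons, List.length_nil, List.length_replicate,
        ← hn, hL64]
      omega
    rw [← singleton_chunk _ hlen]
  · rw [if_neg h1]
    by_cases h2 : 448 ≤ (n : Int) ∧ (n : Int) ≤ 512
    · rw [if_pos h2, fillZeros_LE, chunker_map]
      have hc1 : ((1024 : Int) - ((bs ++ [(1:Int)]).length : Int)).toNat = 1023 - n := by
        simp only [List.length_append, List.length_cons, List.length_nil, ← hn]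
        push_cast
        omega
      rw [hc1]
      have hlen2 : (bs ++ [(1:Int)] ++ List.replicate (1023 - n) (0:Int)).length = 1024 := by
        simp only [List.length_append, List.length_cons, List.length_nil, List.length_replicate, ← hn]
        omega
      rw [hlen2]
      obtain ⟨h2a, h2b⟩ := h2
      have h1023 : 1023 - n = (959 - n) + 64 := by omega
      have hsplit : List.replicate (1023 - n) (0 : Int)
          = List.replicate (959 - n) 0 ++ List.replicate 64 0 := by
        rw [h1023, List.replicate_add]
      have hc2 : (PySem.Int.mod (448 - ((n : Int) + 1)) 512).toNat = 959 - n := by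
        rw [hmod]; omega
      rw [hc2, hsplit]
      have hX : bs ++ [(1:Int)] ++ (List.replicate (959 - n) 0 ++ List.replicate 64 (0:Int))
          = (bs ++ [(1:Int)] ++ List.replicate (959 - n) 0) ++ List.replicate 64 0 := by
        simp [List.append_assoc]
      rw [hX]
      have hXlen : (bs ++ [(1:Int)] ++ List.replicate (959 - n) (0:Int)).length = 1024 - 64 := by
        simp only [List.length_append, List.length_cons, List.length_nil, List.length_replicate, ← hn]
        omega
      rw [← hXlen, List.take_left]
    · rw [if_neg h2, padLoop_eq, chunker_map]
      have hn512 : 512 < n := by omega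
      have hc1 : (512 - ((bs ++ [(1:Int)]).length + 64) % 512) % 512
          = (PySem.Int.mod (448 - ((n : Int) + 1)) 512).toNat := by
        rw [hmod]
        simp only [List.length_append, List.length_cons, List.length_nil, ← hn]
        omega
      rw [hc1]

-- ===== VERDICT (by name: the statement is the Claim_ definition above) =====
theorem preprocessMessage_spec : Claim_equal_preprocessMessage := by
  intro message hdom
  unfold Spec_preprocessMessage
  exact preprocessMessage_eq message hdom
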